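-- pv_equiv track=rewrite | github.com/billowdev/basic-ai-algorithm | _2_bfs_dfs_best_fs_astar/pds/pds2.py | extend_path
-- ===== SOURCE A (Python) =====
-- def extend_path(path, next_frontier, explored):
-- 	if(len(next_frontier)<1):
-- 		return []
-- 	elif next_frontier[0] in path:
-- 		next_frontier.pop(0)
-- 		return extend_path(path, next_frontier, explored)
-- 	elif next_frontier[0] in explored:
-- 		next_frontier.pop(0)
-- 		return extend_path(path, next_frontier, explored)
-- 	else:
-- 		el = next_frontier.pop(0)
-- 		explored.append(el)
-- 		return [[el]+path] + extend_path(path, next_frontier, explored)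
-- ===== SOURCE B (Python) =====
-- def extend_path(path, next_frontier, explored):
--     result = []
--     while next_frontier:
--         el = next_frontier.pop(0)
--         if el in path or el in explored:
--             continue
--         explored.append(el)
--         result.append([el] + path)
--     return result
-- ===== Notes on version B (the rewrite author's own statement) =====
-- stated objective: simpler
-- what changed: Replaced the recursion that concatenates sublists front-to-back with an explicit while-loop over the frontier accumulating results in a list, preserving both in-place mutations (frontier emptied, explored appended in order).
import Mathlib
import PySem

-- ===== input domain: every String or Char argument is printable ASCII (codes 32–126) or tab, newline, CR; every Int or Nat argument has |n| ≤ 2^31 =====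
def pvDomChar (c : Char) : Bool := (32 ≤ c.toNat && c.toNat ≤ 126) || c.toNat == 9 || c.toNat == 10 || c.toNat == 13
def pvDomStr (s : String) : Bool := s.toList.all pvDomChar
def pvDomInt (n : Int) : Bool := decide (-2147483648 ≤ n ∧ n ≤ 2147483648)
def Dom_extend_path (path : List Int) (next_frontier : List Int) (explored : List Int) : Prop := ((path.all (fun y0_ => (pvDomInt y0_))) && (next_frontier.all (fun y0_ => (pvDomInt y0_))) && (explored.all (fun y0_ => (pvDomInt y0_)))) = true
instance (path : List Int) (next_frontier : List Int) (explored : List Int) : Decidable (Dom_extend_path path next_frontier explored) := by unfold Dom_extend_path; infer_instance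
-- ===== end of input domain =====

-- B rewrites A's recursion as an explicit loop with a result accumulator (simpler; same
-- in-place mutations in Python: frontier emptied, explored appended in order).
-- Equivalence proved here is about the RETURN value; both Pythons perform the same mutations.

-- ===== PORT A =====
-- A: recursion on the frontier; popping the head = recursing on the tail; explored.append
-- threads the grown explored list into the recursive call.
def extend_path (path : List Int) (next_frontier : List Int) (explored : List Int) : List (List Int) :=
  match next_frontier with
  | [] => []
  | x :: rest =>
    if x ∈ path then extend_path path rest explored
    else if x ∈ explored then extend_path path rest explored
    else [x :: path] ++ extend_path path rest (explored ++ [x])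

-- ===== PORT B =====
-- B: the while-loop as a tail-recursive helper carrying the result accumulator.
def extendLoop (path : List Int) (next_frontier : List Int) (explored : List Int)
    (result : List (List Int)) : List (List Int) :=
  match next_frontier with
  | [] => result
  | el :: rest =>
    if el ∈ path ∨ el ∈ explored then extendLoop path rest explored result
    else extendLoop path rest (explored ++ [el]) (result ++ [el :: path])

def extend_path_alt (path : List Int) (next_frontier : List Int) (explored : List Int) : List (List Int) :=
  extendLoop path next_frontier explored []

-- ===== PRECONDITION & SPEC =====
def Spec_extend_path (path : List Int) (next_frontier : List Int) (explored : List Int) (out : List (List Int)) : Prop := out = extend_path_alt path next_frontier explored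
instance (path : List Int) (next_frontier : List Int) (explored : List Int) (out : List (List Int)) : Decidable (Spec_extend_path path next_frontier explored out) := by unfold Spec_extend_path; infer_instance

-- ===== CLAIM (what is proved, stated in full; the proofs are below) =====
def Claim_equal_extend_path : Prop := ∀ (path : List Int) (next_frontier : List Int) (explored : List Int), Dom_extend_path path next_frontier explored → Spec_extend_path path next_frontier explored (extend_path path next_frontier explored)

-- ===== LEMMAS AND PROOFS =====
theorem extendLoop_eq (path next_frontier : List Int) :
    ∀ (explored : List Int) (acc : List (List Int)),
      extendLoop path next_frontier explored acc = acc ++ extend_path path next_frontier explored := by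
  induction next_frontier with
  | nil => intro explored acc; simp [extendLoop, extend_path]
  | cons x rest ih =>
    intro explored acc
    by_cases hp : x ∈ path
    · simp [extendLoop, extend_path, hp, ih]
    · by_cases he : x ∈ explored
      · simp [extendLoop, extend_path, hp, he, ih]
      · simp [extendLoop, extend_path, hp, he, ih]

-- ===== VERDICT (by name: the statement is the Claim_ definition above) =====
theorem extend_path_spec : Claim_equal_extend_path := by
  intro path nf ex _
  unfold Spec_extend_path extend_path_alt
  simp [extendLoop_eq]
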